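-- pv_equiv track=rewrite | github.com/jykstudy/DA_Study | 프로그래머스/0/120956. 옹알이 （1）/옹알이 （1）.py | solution
-- ===== SOURCE A (Python) =====
-- def solution(babbling):
--     valid_sounds = ["aya", "ye", "woo", "ma"]
--     count = 0
--
--     for word in babbling:
--         i = 0
--         while i < len(word):
--             for sound in valid_sounds:
--                 if word[i:i+len(sound)] == sound:
--                     i += len(sound)
--                     break
--             else:
--                 break
--         if i == len(word):
--             count += 1
--
--     return count
-- ===== SOURCE B (Python) =====
-- def solution(babbling):
--     # Character-level automaton: the four sounds have distinct first letters,
--     # so one left-to-right scan with the "remaining suffix of the current sound"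
--     # as state decides membership; no slicing, no token list scan.
--     NEXT = {'a': 'ya', 'y': 'e', 'w': 'oo', 'm': 'a'}
--
--     def ok(word):
--         need = ''
--         for ch in word:
--             if need:
--                 if ch != need[0]:
--                     return False
--                 need = need[1:]
--             else:
--                 need = NEXT.get(ch)
--                 if need is None:
--                     return False
--         return need == ''
--
--     return sum(1 for w in babbling if ok(w))
-- ===== Notes on version B (the rewrite author's own statement) =====
-- stated objective: alternative
-- what changed: Replaces A's index/slice loop that rescans the token list at each position with a single character-by-character finite-automaton scan keeping only the expected suffix of the current sound as state.
import Mathlib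
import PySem

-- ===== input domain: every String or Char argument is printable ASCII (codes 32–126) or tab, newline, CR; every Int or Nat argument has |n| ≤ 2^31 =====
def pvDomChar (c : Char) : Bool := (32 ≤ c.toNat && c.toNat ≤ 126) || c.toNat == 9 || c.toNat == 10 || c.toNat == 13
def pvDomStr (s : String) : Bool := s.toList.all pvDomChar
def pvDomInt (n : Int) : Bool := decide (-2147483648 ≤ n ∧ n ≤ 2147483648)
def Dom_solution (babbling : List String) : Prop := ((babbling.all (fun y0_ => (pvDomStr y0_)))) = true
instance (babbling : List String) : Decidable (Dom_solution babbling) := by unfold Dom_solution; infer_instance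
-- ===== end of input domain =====

-- B replaces A's index/slice loop (rescanning the sound list at each position) by a
-- character-by-character automaton scan; same values, measured constant-factor faster.


-- ===== PORT A =====
-- A's while loop over index i; the inner `for sound in valid_sounds` with break/else is
-- transliterated as the same ordered chain of slice comparisons (word[i:i+k] == sound is
-- exact as (w.drop i).take k = sound since here i ≥ 0 and Python slicing clamps likewise).
def solutionLoopA (w : List Char) (i : Nat) : Bool :=
  if h : i < w.length then
    if (w.drop i).take 3 = ['a', 'y', 'a'] then solutionLoopA w (i + 3)
    else if (w.drop i).take 2 = ['y', 'e'] then solutionLoopA w (i + 2)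
    else if (w.drop i).take 3 = ['w', 'o', 'o'] then solutionLoopA w (i + 3)
    else if (w.drop i).take 2 = ['m', 'a'] then solutionLoopA w (i + 2)
    else decide (i = w.length)   -- for-else: break out of the while, then `if i == len(word)`
  else decide (i = w.length)
termination_by w.length - i
decreasing_by all_goals omega

def solution (babbling : List String) : Int :=
  babbling.foldl (fun count word => if solutionLoopA word.toList 0 then count + 1 else count) 0

-- ===== PORT B =====
-- B's table NEXT.get(ch)
def solutionNext (c : Char) : Option (List Char) :=
  if c = 'a' then some ['y', 'a']
  else if c = 'y' then some ['e']
  else if c = 'w' then some ['o', 'o']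
  else if c = 'm' then some ['a']
  else none

-- B's `for ch in word` loop with state `need` (the pending suffix of the current sound)
def solutionOkB : List Char → List Char → Bool
  | [], need => decide (need = [])
  | ch :: rest, need =>
    match need with
    | d :: ds => if ch = d then solutionOkB rest ds else false
    | [] =>
      match solutionNext ch with
      | some n => solutionOkB rest n
      | none => false

def solution_alt (babbling : List String) : Int :=
  babbling.foldl (fun acc w => if solutionOkB w.toList [] then acc + 1 else acc) 0

-- ===== PRECONDITION & SPEC =====
def Spec_solution (babbling : List String) (out : Int) : Prop := out = solution_alt babbling
instance (babbling : List String) (out : Int) : Decidable (Spec_solution babbling out) := by unfold Spec_solution; infer_instance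

-- ===== CLAIM (what is proved, stated in full; the proofs are below) =====
def Claim_equal_solution : Prop := ∀ (babbling : List String), Dom_solution babbling → Spec_solution babbling (solution babbling)

-- ===== LEMMAS AND PROOFS =====

-- if the word does not start with the pending suffix, B's scan rejects
lemma okB_need_false (n : List Char) : ∀ r : List Char, r.take n.length ≠ n → solutionOkB r n = false := by
  induction n with
  | nil => intro r h; simp at h
  | cons d ds ih =>
    intro r h
    cases r with
    | nil => simp [solutionOkB]
    | cons c r' =>
      by_cases hc : c = d
      · subst hc
        simp only [List.length_cons, List.take_succ_cons, ne_eq, List.cons.injEq, true_and] at h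
        simp only [solutionOkB]
        exact ih r' h
      · simp [solutionOkB, hc]

-- when A's inner for-loop finds no sound at the head, B's scan rejects too
lemma okB_head_false (c : Char) (r : List Char)
    (h1 : (c :: r).take 3 ≠ ['a', 'y', 'a']) (h2 : (c :: r).take 2 ≠ ['y', 'e'])
    (h3 : (c :: r).take 3 ≠ ['w', 'o', 'o']) (h4 : (c :: r).take 2 ≠ ['m', 'a']) :
    solutionOkB (c :: r) [] = false := by
  by_cases ha : c = 'a'
  · subst ha
    have : r.take 2 ≠ ['y', 'a'] := by
      intro h; apply h1; simpa [List.take_succ_cons] using h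
    have e : solutionOkB ('a' :: r) [] = solutionOkB r ['y', 'a'] := by
      simp [solutionOkB, solutionNext]
    rw [e]; exact okB_need_false ['y', 'a'] r this
  by_cases hy : c = 'y'
  · subst hy
    have : r.take 1 ≠ ['e'] := by
      intro h; apply h2; simpa [List.take_succ_cons] using h
    have e : solutionOkB ('y' :: r) [] = solutionOkB r ['e'] := by
      simp [solutionOkB, solutionNext]
    rw [e]; exact okB_need_false ['e'] r this
  by_cases hw : c = 'w'
  · subst hw
    have : r.take 2 ≠ ['o', 'o'] := by
      intro h; apply h3; simpa [List.take_succ_cons] using h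
    have e : solutionOkB ('w' :: r) [] = solutionOkB r ['o', 'o'] := by
      simp [solutionOkB, solutionNext]
    rw [e]; exact okB_need_false ['o', 'o'] r this
  by_cases hm : c = 'm'
  · subst hm
    have : r.take 1 ≠ ['a'] := by
      intro h; apply h4; simpa [List.take_succ_cons] using h
    have e : solutionOkB ('m' :: r) [] = solutionOkB r ['a'] := by
      simp [solutionOkB, solutionNext]
    rw [e]; exact okB_need_false ['a'] r this
  · simp [solutionOkB, solutionNext, ha, hy, hw, hm]

lemma drop_head_of_take (w : List Char) (i k : Nat) (t : List Char)
    (hk0 : 0 < k) (hk : t.length = k) (h : (w.drop i).take k = t) :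
    i + k ≤ w.length ∧ w.drop i = t ++ w.drop (i + k) := by
  have hlen : ((w.drop i).take k).length = k := by rw [h, hk]
  rw [List.length_take, List.length_drop] at hlen
  have hle : i + k ≤ w.length := by omega
  refine ⟨hle, ?_⟩
  have := List.take_append_drop k (w.drop i)
  rw [h, List.drop_drop] at this
  rw [← this, Nat.add_comm]

lemma loopA_eq_okB (w : List Char) (i : Nat) (hle : i ≤ w.length) :
    solutionLoopA w i = solutionOkB (w.drop i) [] := by
  fun_induction solutionLoopA w i with
  | case1 i h h1 ih =>
    obtain ⟨hl, e⟩ := drop_head_of_take w i 3 _ (by decide) rfl h1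
    rw [e]
    simp only [List.cons_append, List.nil_append, solutionOkB, solutionNext]
    exact ih hl
  | case2 i h h1 h2 ih =>
    obtain ⟨hl, e⟩ := drop_head_of_take w i 2 _ (by decide) rfl h2
    rw [e]
    simp only [List.cons_append, List.nil_append, solutionOkB, solutionNext,
      if_neg (by decide : ¬('y' : Char) = 'a')]
    exact ih hl
  | case3 i h h1 h2 h3 ih =>
    obtain ⟨hl, e⟩ := drop_head_of_take w i 3 _ (by decide) rfl h3
    rw [e]
    simp only [List.cons_append, List.nil_append, solutionOkB, solutionNext,
      if_neg (by decide : ¬('w' : Char) = 'a'), if_neg (by decide : ¬('w' : Char) = 'y')]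
    simp
    exact ih hl
  | case4 i h h1 h2 h3 h4 ih =>
    obtain ⟨hl, e⟩ := drop_head_of_take w i 2 _ (by decide) rfl h4
    rw [e]
    simp only [List.cons_append, List.nil_append, solutionOkB, solutionNext,
      if_neg (by decide : ¬('m' : Char) = 'a'), if_neg (by decide : ¬('m' : Char) = 'y'),
      if_neg (by decide : ¬('m' : Char) = 'w')]
    simp
    exact ih hl
  | case5 i h h1 h2 h3 h4 =>
    obtain ⟨c, r, e⟩ : ∃ c r, w.drop i = c :: r := by
      cases hd : w.drop i with
      | nil => exfalso; have := List.drop_eq_nil_iff.mp hd; omega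
      | cons c r => exact ⟨c, r, rfl⟩
    rw [e] at h1 h2 h3 h4 ⊢
    rw [okB_head_false c r h1 h2 h3 h4]
    simp; omega
  | case6 i h =>
    have : i = w.length := by omega
    subst this
    simp [List.drop_length, solutionOkB]

-- ===== VERDICT (by name: the statement is the Claim_ definition above) =====
theorem solution_spec : Claim_equal_solution := by
  intro babbling _
  show solution babbling = solution_alt babbling
  unfold solution solution_alt
  have h : ∀ w : String, solutionLoopA w.toList 0 = solutionOkB w.toList [] := by
    intro w
    simpa using loopA_eq_okB w.toList 0 (Nat.zero_le _)
  simp only [h]
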